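-- pv_equiv track=rewrite | github.com/reivak720/cows | racer.py | elessime
-- ===== SOURCE A (Python) =====
-- def elessime(cows,limit=10):
--     pasengers=sorted(cows.items(),reverse=True,key=lambda x:x[1])
--     trip, schedule, buffPas = [], [], []
--     while (pasengers):
--         lim=limit
--         trip=[]
--         for i in range(len(pasengers)):
--             if pasengers[i][1]<=lim:
--                 lim-=pasengers[i][1]
--                 trip.append(pasengers[i][0])
--             else:
--                 buffPas.append(pasengers[i])
--         pasengers = buffPas
--         buffPas = []
--         schedule.append(trip)
--     return schedule
-- ===== SOURCE B (Python) =====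
-- def elessime(cows, limit=10):
--     pasengers = sorted(cows.items(), reverse=True, key=lambda x: x[1])
--     trips = []   # parallel: trips[i] = [names, remaining]
--     for name, weight in pasengers:
--         for t in trips:
--             if weight <= t[1]:
--                 t[0].append(name)
--                 t[1] -= weight
--                 break
--         else:
--             trips.append([[name], limit - weight])
--     return [t[0] for t in trips]
-- ===== Notes on version B (the rewrite author's own statement) =====
-- stated objective: alternative
-- what changed: A repeatedly sweeps the whole remaining passenger list, building one trip per sweep and deferring non-fitting passengers to the next sweep; B makes a single pass over the sorted passengers, maintaining open trips with their remaining capacities and placing each passenger into the first trip it fits (first-fit decreasing), opening a new trip when none fits.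
import Mathlib
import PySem

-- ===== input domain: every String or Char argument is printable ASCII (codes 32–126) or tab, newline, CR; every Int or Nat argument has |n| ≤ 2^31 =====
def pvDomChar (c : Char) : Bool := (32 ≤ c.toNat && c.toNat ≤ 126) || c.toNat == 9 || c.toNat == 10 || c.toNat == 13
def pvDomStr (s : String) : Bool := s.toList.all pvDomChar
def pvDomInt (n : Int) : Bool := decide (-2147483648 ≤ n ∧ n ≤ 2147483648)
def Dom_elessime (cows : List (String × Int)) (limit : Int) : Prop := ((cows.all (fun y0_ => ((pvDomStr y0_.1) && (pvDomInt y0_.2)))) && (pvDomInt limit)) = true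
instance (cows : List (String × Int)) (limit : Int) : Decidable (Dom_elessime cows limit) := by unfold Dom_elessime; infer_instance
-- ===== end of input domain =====

-- B replaces A's repeated deferring sweeps by a single first-fit-decreasing pass keeping
-- per-trip remaining capacities (alternative decomposition; same return value on Pre_).

-- ===== PORT A =====
-- the for-loop body of A: scan passengers in order, accepting those that fit the
-- current trip's remaining capacity `lim`, deferring the others into `buff`
def elessimeRound : List (String × Int) → Int → List String → List (String × Int) →
    List String × List (String × Int)
  | [], _, trip, buff => (trip, buff)
  | p :: rest, lim, trip, buff =>
      if p.2 ≤ lim then elessimeRound rest (lim - p.2) (trip ++ [p.1]) buff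
      else elessimeRound rest lim trip (buff ++ [p])

-- A's while-loop; fuel only makes the recursion total (A diverges when a weight
-- exceeds limit; those inputs are outside Pre_ and the fuel branch is unreached there)
def elessimeLoop (limit : Int) : Nat → List (String × Int) → List (List String) → List (List String)
  | _, [], schedule => schedule
  | 0, _ :: _, schedule => schedule
  | fuel + 1, p :: rest, schedule =>
      let (trip, buff) := elessimeRound (p :: rest) limit [] []
      elessimeLoop limit fuel buff (schedule ++ [trip])

def elessime (cows : List (String × Int)) (limit : Int) : List (List String) :=
  let pasengers := PySem.List.sorted cows (fun x => x.2) true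
  elessimeLoop limit pasengers.length pasengers []

-- ===== PORT B =====
-- first-fit: put the passenger into the first open trip whose remaining capacity fits,
-- otherwise open a new trip
def ffInsert (limit : Int) (name : String) (w : Int) :
    List (List String × Int) → List (List String × Int)
  | [] => [([name], limit - w)]
  | (t, r) :: rest =>
      if w ≤ r then (t ++ [name], r - w) :: rest
      else (t, r) :: ffInsert limit name w rest

def elessime_alt (cows : List (String × Int)) (limit : Int) : List (List String) :=
  let pasengers := PySem.List.sorted cows (fun x => x.2) true
  (pasengers.foldl (fun trips p => ffInsert limit p.1 p.2 trips) []).map (·.1)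

-- ===== PRECONDITION & SPEC =====
-- Pre_ excludes exactly the inputs with a weight above limit, on which A's while loop
-- never terminates (the too-heavy passenger is re-deferred forever); A returns no value there.
def Pre_elessime (cows : List (String × Int)) (limit : Int) : Prop :=
  ∀ p ∈ cows, p.2 ≤ limit
instance (cows : List (String × Int)) (limit : Int) : Decidable (Pre_elessime cows limit) := by
  unfold Pre_elessime; infer_instance

def pvWitness_elessime : (List (String × Int)) × Int := ([("a", 3), ("b", 2), ("c", 3)], 5)

def Spec_elessime (cows : List (String × Int)) (limit : Int) (out : List (List String)) : Prop :=
  out = elessime_alt cows limit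
instance (cows : List (String × Int)) (limit : Int) (out : List (List String)) :
    Decidable (Spec_elessime cows limit out) := by unfold Spec_elessime; infer_instance

-- ===== CLAIM (what is proved, stated in full; the proofs are below) =====
def Claim_equal_elessime : Prop := ∀ (cows : List (String × Int)) (limit : Int),
  Dom_elessime cows limit → Pre_elessime cows limit →
  Spec_elessime cows limit (elessime cows limit)

-- ===== LEMMAS AND PROOFS =====

-- characterisation of one sweep of A with empty accumulators: (accepted names, final lim, deferred)
def scanR (r : Int) : List (String × Int) → List String × Int × List (String × Int)
  | [] => ([], r, [])
  | (n, w) :: ps =>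
      if w ≤ r then (n :: (scanR (r - w) ps).1, (scanR (r - w) ps).2.1, (scanR (r - w) ps).2.2)
      else ((scanR r ps).1, (scanR r ps).2.1, (n, w) :: (scanR r ps).2.2)

theorem elessimeRound_eq (ps : List (String × Int)) :
    ∀ (lim : Int) (trip : List String) (buff : List (String × Int)),
    elessimeRound ps lim trip buff = (trip ++ (scanR lim ps).1, buff ++ (scanR lim ps).2.2) := by
  induction ps with
  | nil => intro lim trip buff; simp [elessimeRound, scanR]
  | cons p ps ih =>
      intro lim trip buff
      obtain ⟨n, w⟩ := p
      by_cases h : w ≤ lim <;> simp [elessimeRound, scanR, h, ih]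

theorem scanR_deferred_subset (ps : List (String × Int)) :
    ∀ (r : Int), ∀ p ∈ (scanR r ps).2.2, p ∈ ps := by
  induction ps with
  | nil => intro r p hp; simp [scanR] at hp
  | cons q ps ih =>
      intro r p hp
      obtain ⟨n, w⟩ := q
      by_cases h : w ≤ r <;> simp [scanR, h] at hp
      · exact List.mem_cons_of_mem _ (ih _ _ hp)
      · rcases hp with hp | hp
        · simp [hp]
        · exact List.mem_cons_of_mem _ (ih _ _ hp)

theorem scanR_deferred_length (ps : List (String × Int)) :
    ∀ (r : Int), (scanR r ps).2.2.length ≤ ps.length := by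
  induction ps with
  | nil => intro r; simp [scanR]
  | cons q ps ih =>
      intro r
      obtain ⟨n, w⟩ := q
      by_cases h : w ≤ r <;> simp [scanR, h]
      · exact Nat.le_succ_of_le (ih _)
      · exact ih _

-- the key invariant: first-fit starting from an open trip (t, r) fills t with exactly the
-- passengers one sweep of A accepts at remaining r, and recurses on the deferred ones
theorem ff_cons (limit : Int) (ps : List (String × Int)) :
    ∀ (t : List String) (r : Int) (S : List (List String × Int)),
    List.foldl (fun trips p => ffInsert limit p.1 p.2 trips) ((t, r) :: S) ps
      = (t ++ (scanR r ps).1, (scanR r ps).2.1)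
        :: List.foldl (fun trips p => ffInsert limit p.1 p.2 trips) S (scanR r ps).2.2 := by
  induction ps with
  | nil => intro t r S; simp [scanR]
  | cons q ps ih =>
      intro t r S
      obtain ⟨n, w⟩ := q
      by_cases h : w ≤ r
      · simp only [List.foldl_cons]
        rw [show ffInsert limit (n, w).1 (n, w).2 ((t, r) :: S) = (t ++ [n], r - w) :: S from by
              simp [ffInsert, h]]
        rw [ih (t ++ [n]) (r - w) S]
        simp [scanR, h]
      · simp only [List.foldl_cons]
        rw [show ffInsert limit (n, w).1 (n, w).2 ((t, r) :: S) = (t, r) :: ffInsert limit n w S from by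
              simp [ffInsert, h]]
        rw [ih t r (ffInsert limit n w S)]
        simp [scanR, h]

theorem loop_eq_ff (limit : Int) :
    ∀ (fuel : Nat) (ps : List (String × Int)), ps.length ≤ fuel →
    (∀ p ∈ ps, p.2 ≤ limit) → ∀ (schedule : List (List String)),
    elessimeLoop limit fuel ps schedule
      = schedule ++ (List.foldl (fun trips p => ffInsert limit p.1 p.2 trips) [] ps).map (·.1) := by
  intro fuel
  induction fuel with
  | zero =>
      intro ps hlen _ schedule
      match ps, hlen with
      | [], _ => simp [elessimeLoop]
  | succ f ih =>
      intro ps hlen hw schedule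
      match ps with
      | [] => simp [elessimeLoop]
      | (n, w) :: rest =>
          have hwn : w ≤ limit := hw (n, w) (List.mem_cons_self)
          have hlen' : (scanR (limit - w) rest).2.2.length ≤ f := by
            have hd := scanR_deferred_length rest (limit - w)
            simp at hlen; omega
          simp only [elessimeLoop, elessimeRound_eq]
          simp only [List.foldl_cons, ffInsert]
          rw [ff_cons limit rest [n] (limit - w) []]
          simp only [scanR, hwn, if_pos, List.nil_append]
          rw [ih _ hlen'
                (fun p hp => hw p (List.mem_cons_of_mem _ (scanR_deferred_subset rest _ p hp)))]
          simp

-- ===== VERDICT (by name: the statement is the Claim_ definition above) =====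
theorem elessime_spec : Claim_equal_elessime := by
  intro cows limit _ hpre
  unfold Spec_elessime elessime elessime_alt
  apply loop_eq_ff limit _ _ le_rfl
  intro p hp
  exact hpre p ((PySem.List.mem_sorted _ _ _ _).1 hp)
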